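-- pv_equiv track=rewrite | github.com/Radyah2001/Group5_LegoRobot | main.py | get_multiple_closest_offsets
-- ===== SOURCE A (Python) =====
-- import math
--
-- def calcDist(target, frontArrow):
--     return math.sqrt((frontArrow[0] - target[0]) ** 2 + (frontArrow[1] - target[1]) ** 2)
--
-- def get_multiple_closest_offsets(cross_center, target, offset, arrow_center):
--     offsets = [
--         (cross_center[0], cross_center[1] + offset),  # North
--         (cross_center[0], cross_center[1] - offset),  # South
--         (cross_center[0] + offset, cross_center[1]),  # East
--         (cross_center[0] - offset, cross_center[1])  # West
--     ]
--     distances = [calcDist(target, offset) for offset in offsets]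
--     sorted_indices = sorted(range(len(distances)), key=lambda i: distances[i])
--     second_closest_offset = offsets[sorted_indices[1]]
--     closest_offset = offsets[sorted_indices[0]]
--
--     if calcDist(closest_offset, arrow_center) > calcDist(second_closest_offset, arrow_center):
--         return second_closest_offset
--     else:
--         return closest_offset
-- ===== SOURCE B (Python) =====
-- import math
--
-- def get_multiple_closest_offsets(cross_center, target, offset, arrow_center):
--     x, y = cross_center
--     candidates = [(x, y + offset), (x, y - offset), (x + offset, y), (x - offset, y)]
--
--     def dist(p, q):
--         return math.sqrt((p[0] - q[0]) ** 2 + (p[1] - q[1]) ** 2)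
--
--     best = None
--     second = None
--     for p in candidates:
--         d = dist(p, target)
--         if best is None or d < best[0]:
--             best, second = (d, p), best
--         elif second is None or d < second[0]:
--             second = (d, p)
--     if dist(best[1], arrow_center) <= dist(second[1], arrow_center):
--         return best[1]
--     return second[1]
-- ===== Notes on version B (the rewrite author's own statement) =====
-- stated objective: alternative
-- what changed: B replaces A's index-sort over the four candidate distances by a single scan that keeps the best and second-best candidate (ties keep the earlier candidate, matching sorted's stability), and picks between them by one direct comparison against the arrow distance.
import Mathlib
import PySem

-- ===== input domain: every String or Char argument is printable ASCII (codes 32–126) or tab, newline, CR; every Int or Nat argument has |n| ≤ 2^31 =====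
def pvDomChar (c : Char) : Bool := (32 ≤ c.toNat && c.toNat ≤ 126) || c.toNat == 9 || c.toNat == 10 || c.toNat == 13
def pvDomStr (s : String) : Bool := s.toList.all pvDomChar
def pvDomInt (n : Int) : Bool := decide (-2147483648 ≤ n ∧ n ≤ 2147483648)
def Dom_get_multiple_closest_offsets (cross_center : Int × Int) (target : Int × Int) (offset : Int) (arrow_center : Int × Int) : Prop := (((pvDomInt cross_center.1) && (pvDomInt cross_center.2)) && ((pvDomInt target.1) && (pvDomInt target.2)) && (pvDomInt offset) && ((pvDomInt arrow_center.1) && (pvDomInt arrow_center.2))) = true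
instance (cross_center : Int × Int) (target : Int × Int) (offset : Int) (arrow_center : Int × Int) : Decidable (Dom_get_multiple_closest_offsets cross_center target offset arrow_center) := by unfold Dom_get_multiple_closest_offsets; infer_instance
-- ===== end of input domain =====

-- B replaces A's sorted() over the four candidate indices by a single scan keeping the best and
-- second-best candidate (ties keep the earlier candidate, matching sorted's stability); same result.
-- Both ports model Python's float distances exactly: `math.sqrt(float(n))` for the integer squared
-- distances arising here is encoded by an order-isomorphic integer key (round-to-nearest-even to 53
-- bits, then correctly rounded square root on a 2^-52-scaled grid), so all comparisons are exact.

-- ===== shared float-semantics helpers =====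
-- pvRnd53 n = the integer value of the binary64 float(n) for 0 ≤ n (round to 53 significant bits, nearest-even)
def pvRnd53 (x : Int) : Int :=
  let n := x.toNat
  if n = 0 then 0 else
  let L := n.log2 + 1
  if L ≤ 53 then (n : Int) else
  let t := L - 53
  let q := n / 2 ^ t
  let r := n % 2 ^ t
  let half := 2 ^ (t - 1)
  let q' := if r > half ∨ (r = half ∧ q % 2 = 1) then q + 1 else q
  ((q' * 2 ^ t : Nat) : Int)

-- pvSqrtKey y = (binary64 sqrt of the float-exact integer y) * 2^52, an order-isomorphic integer key
def pvSqrtKey (y : Int) : Int :=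
  let n := y.toNat
  if n = 0 then 0 else
  let L := n.log2 + 1
  let k := (L - 1) / 2
  let N := n * 4 ^ (52 - k)
  let m := N.sqrt
  let m' := if 4 * N > (2 * m + 1) ^ 2 then m + 1 else m
  ((m' * 2 ^ k : Nat) : Int)

-- key of calcDist(q, p) = math.sqrt((p0-q0)**2 + (p1-q1)**2); exact for the comparisons made here
def pvDistKey (p q : Int × Int) : Int :=
  pvSqrtKey (pvRnd53 ((p.1 - q.1) ^ 2 + (p.2 - q.2) ^ 2))

-- ===== PORT A =====
def get_multiple_closest_offsets (cross_center : Int × Int) (target : Int × Int) (offset : Int) (arrow_center : Int × Int) : Int × Int :=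
  let offsets : List (Int × Int) :=
    [(cross_center.1, cross_center.2 + offset),
     (cross_center.1, cross_center.2 - offset),
     (cross_center.1 + offset, cross_center.2),
     (cross_center.1 - offset, cross_center.2)]
  let distances := offsets.map (fun p => pvDistKey p target)
  let sorted_indices := PySem.List.sorted (PySem.List.pyRange 0 (distances.length) 1)
      (fun i => PySem.List.pyGetD distances i 0) false
  let second_closest_offset := PySem.List.pyGetD offsets (PySem.List.pyGetD sorted_indices 1 0) (0, 0)
  let closest_offset := PySem.List.pyGetD offsets (PySem.List.pyGetD sorted_indices 0 0) (0, 0)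
  if pvDistKey arrow_center closest_offset > pvDistKey arrow_center second_closest_offset then
    second_closest_offset
  else
    closest_offset

-- ===== PORT B =====
-- one step of B's scan: state = (best, second), each an optional (distance key, point)
def pvScanStep (target : Int × Int)
    (st : Option (Int × (Int × Int)) × Option (Int × (Int × Int))) (p : Int × Int) :
    Option (Int × (Int × Int)) × Option (Int × (Int × Int)) :=
  let d := pvDistKey p target
  match st.1 with
  | none => (some (d, p), st.1)
  | some b =>
    if d < b.1 then (some (d, p), st.1)
    else
      match st.2 with
      | none => (st.1, some (d, p))
      | some s => if d < s.1 then (st.1, some (d, p)) else st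

def get_multiple_closest_offsets_alt (cross_center : Int × Int) (target : Int × Int) (offset : Int) (arrow_center : Int × Int) : Int × Int :=
  let x := cross_center.1
  let y := cross_center.2
  let candidates : List (Int × Int) := [(x, y + offset), (x, y - offset), (x + offset, y), (x - offset, y)]
  let st := candidates.foldl (pvScanStep target) (none, none)
  match st with
  | (some b, some s) =>
    if pvDistKey b.2 arrow_center ≤ pvDistKey s.2 arrow_center then b.2 else s.2
  | (some b, none) => b.2
  | _ => (0, 0)

-- ===== PRECONDITION & SPEC =====
def Spec_get_multiple_closest_offsets (cross_center : Int × Int) (target : Int × Int) (offset : Int) (arrow_center : Int × Int) (out : Int × Int) : Prop := out = get_multiple_closest_offsets_alt cross_center target offset arrow_center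
instance (cross_center : Int × Int) (target : Int × Int) (offset : Int) (arrow_center : Int × Int) (out : Int × Int) : Decidable (Spec_get_multiple_closest_offsets cross_center target offset arrow_center out) := by unfold Spec_get_multiple_closest_offsets; infer_instance

-- ===== CLAIM =====
def Claim_equal_get_multiple_closest_offsets : Prop := ∀ (cross_center : Int × Int) (target : Int × Int) (offset : Int) (arrow_center : Int × Int), Dom_get_multiple_closest_offsets cross_center target offset arrow_center → Spec_get_multiple_closest_offsets cross_center target offset arrow_center (get_multiple_closest_offsets cross_center target offset arrow_center)

-- ===== LEMMAS AND PROOFS =====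
theorem pvDistKey_comm (p q : Int × Int) : pvDistKey p q = pvDistKey q p := by
  simp only [pvDistKey]; ring_nf

-- ===== VERDICT =====
set_option maxHeartbeats 2000000 in
theorem get_multiple_closest_offsets_spec : Claim_equal_get_multiple_closest_offsets := by
  intro cc t o ac _
  unfold Spec_get_multiple_closest_offsets
  unfold get_multiple_closest_offsets get_multiple_closest_offsets_alt
  simp only [List.map_cons, List.map_nil, List.length_cons, List.length_nil, List.foldl_cons, List.foldl_nil, pvScanStep]
  norm_num
  rw [show PySem.List.pyRange 0 4 1 = [0,1,2,3] from by decide]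
  simp only [PySem.List.sorted]
  simp only [pvDistKey_comm ac]
  generalize pvDistKey (cc.1, cc.2+o) t = d0
  generalize pvDistKey (cc.1, cc.2-o) t = d1
  generalize pvDistKey (cc.1+o, cc.2) t = d2
  generalize pvDistKey (cc.1-o, cc.2) t = d3
  simp only [List.foldl_cons, List.foldl_nil]
  by_cases h10 : d1 < d0 <;> by_cases h20 : d2 < d0 <;> by_cases h21 : d2 < d1 <;>
    by_cases h30 : d3 < d0 <;> by_cases h31 : d3 < d1 <;> by_cases h32 : d3 < d2 <;>
  first
    | omega
    | (simp only [PySem.List.insertBy, PySem.List.pyGetD_ofNat', List.getD_cons_zero,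
        List.getD_cons_succ, decide_eq_true_eq, h10, h20, h21, h30, h31, h32,
        if_true, if_false, iff_true, decide_true, decide_false,
        Bool.false_eq_true]
       split_ifs <;> first | rfl | omega)
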